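-- pv_equiv track=rewrite | github.com/Nickdiaz14/Binary-Puzzle | app.py | check_rows_ga
-- ===== SOURCE A (Python) =====
-- def check_rows_ga(matrix):
--     check = []
--     n = len(matrix)
--     for row in matrix:
--         for i in range(n-2):
--             if row[i] == row[i+1] == row[i+2]:
--                 check.append(2)
--         if sum(row) != int((n)/2):
--             check.append(3)
--     return check
-- ===== SOURCE B (Python) =====
-- def _rle(cells):
--     """Run-length encode cells into (value, length) pairs for maximal runs."""
--     runs = []
--     for x in cells:
--         if runs and runs[-1][0] == x:
--             runs[-1] = (x, runs[-1][1] + 1)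
--         else:
--             runs.append((x, 1))
--     return runs
--
--
-- def check_rows_ga(matrix):
--     width = len(matrix)  # square puzzle grid: each row has `width` cells
--     out = []
--     for row in matrix:
--         for _, length in _rle(row[:width]):
--             out += [2] * (length - 2)
--         if sum(row) != width // 2:
--             out.append(3)
--     return out
-- ===== Notes on version B (the rewrite author's own statement) =====
-- stated objective: alternative
-- what changed: Replaces A's fixed 3-wide window index comparisons with run-length encoding of each row into (value, length) runs and emitting [2]*(length-2) per maximal run; Pre_ restricts to the puzzle's natural domain (at most 2 rows, or every row at least as long as the number of rows), outside of which A raises IndexError on most inputs and the short-row inputs where it still returns are not part of the square-grid task.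
-- outside the precondition, e.g. on check_rows_ga([[0, 1], [1, 0], [0, 1]]): A returns [], B returns []
import Mathlib
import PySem

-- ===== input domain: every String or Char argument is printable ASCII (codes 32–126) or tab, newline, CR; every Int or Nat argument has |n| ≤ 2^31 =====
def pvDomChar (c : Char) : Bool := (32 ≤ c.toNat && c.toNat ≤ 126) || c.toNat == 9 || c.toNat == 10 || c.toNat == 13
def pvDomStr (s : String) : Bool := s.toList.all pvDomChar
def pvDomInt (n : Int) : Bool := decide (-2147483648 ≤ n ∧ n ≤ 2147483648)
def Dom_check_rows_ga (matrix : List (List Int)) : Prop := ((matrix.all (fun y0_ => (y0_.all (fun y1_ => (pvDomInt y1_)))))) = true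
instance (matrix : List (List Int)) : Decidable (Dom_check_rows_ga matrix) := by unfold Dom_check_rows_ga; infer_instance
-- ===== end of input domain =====

-- B run-length encodes each row into (value, length) runs and emits [2]*(length-2)
-- per maximal run, instead of A's fixed 3-wide window index comparisons (objective: alternative).

-- ===== PORT A =====
def check_rows_ga (matrix : List (List Int)) : List Int :=
  let n : Int := (matrix.length : Int)
  matrix.foldl (fun check row =>
    let check :=
      (PySem.List.pyRange 0 (n - 2) 1).foldl (fun ch i =>
        match PySem.List.pyGet? row i, PySem.List.pyGet? row (i + 1), PySem.List.pyGet? row (i + 2) with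
        | some a, some b, some c => if a = b ∧ b = c then ch ++ [2] else ch
        | _, _, _ => ch) check   -- 'none' = IndexError in Python; excluded by Pre_
    if row.sum ≠ PySem.Int.floordiv n 2 then check ++ [3] else check) []

-- ===== PORT B =====
-- _rle: Python appends (x,1) or rewrites the last pair in place; the port keeps the
-- run list reversed (most recent run at the head) and reverses once at the end.
def pvRle (cells : List Int) : List (Int × Int) :=
  (cells.foldl (fun runs x =>
    match runs with
    | (v, c) :: rest => if v = x then (v, c + 1) :: rest else (x, 1) :: (v, c) :: rest
    | [] => [(x, 1)]) []).reverse

def check_rows_ga_alt (matrix : List (List Int)) : List Int :=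
  let width : Int := (matrix.length : Int)
  matrix.foldl (fun out row =>
    let out := (pvRle (PySem.List.slice row none (some width))).foldl
      (fun out vl => out ++ List.replicate (vl.2 - 2).toNat 2) out   -- out += [2] * (length - 2)
    if row.sum ≠ PySem.Int.floordiv width 2 then out ++ [3] else out) []

-- ===== PRECONDITION & SPEC =====
-- A indexes row[i+1]/row[i+2] for i < len(matrix)-2 and raises IndexError on most
-- matrices with a row shorter than len(matrix); Pre_ requires full-width rows (the
-- natural square-puzzle domain). This also excludes the few short-row inputs where A
-- still returns (its chained comparison short-circuits before the out-of-range index);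
-- such rows are not part of the square-grid task.
def Pre_check_rows_ga (matrix : List (List Int)) : Prop :=
  matrix.length ≤ 2 ∨ ∀ row ∈ matrix, matrix.length ≤ row.length
instance (matrix : List (List Int)) : Decidable (Pre_check_rows_ga matrix) := by
  unfold Pre_check_rows_ga; infer_instance
def pvWitness_check_rows_ga : List (List Int) := [[0, 1, 0], [1, 0, 1], [1, 1, 1]]

def Spec_check_rows_ga (matrix : List (List Int)) (out : List Int) : Prop := out = check_rows_ga_alt matrix
instance (matrix : List (List Int)) (out : List Int) : Decidable (Spec_check_rows_ga matrix out) := by unfold Spec_check_rows_ga; infer_instance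

-- ===== CLAIM (what is proved, stated in full; the proofs are below) =====
def Claim_equal_check_rows_ga : Prop := ∀ (matrix : List (List Int)), Dom_check_rows_ga matrix → Pre_check_rows_ga matrix → Spec_check_rows_ga matrix (check_rows_ga matrix)

-- ===== LEMMAS AND PROOFS =====

-- number of triple positions i with xs[i] = xs[i+1] = xs[i+2]
def cntT : List Int → Nat
  | a :: b :: c :: rest => (if a = b ∧ b = c then 1 else 0) + cntT (b :: c :: rest)
  | _ => 0

-- forward count of triples contributed while scanning with a current run (v, c)
def gRun : Int → Int → List Int → Nat
  | _, c, [] => (c - 2).toNat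
  | v, c, x :: t => if v = x then gRun v (c + 1) t else (c - 2).toNat + gRun x 1 t

def sumStack (rs : List (Int × Int)) : Nat := (rs.map (fun p => (p.2 - 2).toNat)).sum

lemma gRun_spec (t : List Int) : ∀ (v c : Int),
    ((2 : Int) ≤ c → gRun v c t = (c - 2).toNat + cntT (v :: v :: t)) ∧
    (gRun v 1 t = cntT (v :: t)) := by
  induction t with
  | nil => intro v c; constructor <;> simp [gRun, cntT]
  | cons x t' ih =>
      intro v c
      by_cases hvx : v = x
      · subst hvx
        constructor
        · intro hc
          simp only [gRun]
          rw [(ih v (c + 1)).1 (by omega)]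
          simp only [cntT]
          simp
          omega
        · simp only [gRun]
          rw [(ih v (1 + 1)).1 (by omega)]
          norm_num
      · constructor
        · intro hc
          simp only [gRun, if_neg hvx]
          rw [(ih x 1).2]
          cases t' with
          | nil => simp [cntT, hvx]
          | cons y t'' => simp [cntT, hvx]
        · simp only [gRun, if_neg hvx]
          rw [(ih x 1).2]
          cases t' with
          | nil => simp [cntT]
          | cons y t'' => simp [cntT, hvx]

lemma stack_fold (cells : List Int) : ∀ (v c : Int) (rest : List (Int × Int)),
    sumStack (cells.foldl (fun runs x =>
      match runs with
      | (v, c) :: rest => if v = x then (v, c + 1) :: rest else (x, 1) :: (v, c) :: rest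
      | [] => [(x, 1)]) ((v, c) :: rest))
    = sumStack rest + gRun v c cells := by
  induction cells with
  | nil => intro v c rest; simp [sumStack, gRun, Nat.add_comm]
  | cons x t ih =>
      intro v c rest
      simp only [List.foldl_cons, gRun]
      by_cases hvx : v = x
      · rw [if_pos hvx, if_pos hvx, ih]
      · rw [if_neg hvx, if_neg hvx, ih]
        simp [sumStack]; omega

lemma sum_pvRle (cells : List Int) : sumStack (pvRle cells) = cntT cells := by
  have hrev : ∀ rs : List (Int × Int), sumStack rs.reverse = sumStack rs := by
    intro rs; simp [sumStack]
  cases cells with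
  | nil => simp [pvRle, sumStack, cntT]
  | cons x t =>
      unfold pvRle
      rw [hrev]
      simp only [List.foldl_cons]
      rw [stack_fold t x 1 []]
      simpa [sumStack] using (gRun_spec t x 1).2

lemma foldl_replicate (rs : List (Int × Int)) : ∀ (acc : List Int),
    rs.foldl (fun out vl => out ++ List.replicate (vl.2 - 2).toNat 2) acc
      = acc ++ List.replicate (sumStack rs) 2 := by
  induction rs with
  | nil => intro acc; simp [sumStack]
  | cons p rest ih =>
      intro acc
      simp only [List.foldl_cons]
      rw [ih, List.append_assoc, ← List.replicate_add]
      simp [sumStack]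

lemma foldA_inner (d : Nat) : ∀ (row : List Int) (k : Int) (ch : List Int), 0 ≤ k →
    k + d + 2 ≤ row.length →
    ((PySem.List.pyRange k (k + d) 1).foldl (fun ch i =>
        match PySem.List.pyGet? row i, PySem.List.pyGet? row (i + 1), PySem.List.pyGet? row (i + 2) with
        | some a, some b, some c => if a = b ∧ b = c then ch ++ [2] else ch
        | _, _, _ => ch) ch)
      = ch ++ List.replicate (cntT ((row.drop k.toNat).take (d + 2))) 2 := by
  induction d with
  | zero =>
      intro row k ch hk hlen
      rw [PySem.List.pyRange_one_eq_nil (by omega)]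
      have h0 : cntT ((row.drop k.toNat).take 2) = 0 := by
        match h : (row.drop k.toNat).take 2, List.length_take_le 2 (row.drop k.toNat) with
        | [], _ => simp [cntT]
        | [a], _ => simp [cntT]
        | [a, b], _ => simp [cntT]
        | a :: b :: c :: t, hl => simp at hl
      simp [h0]
  | succ e ih =>
      intro row k ch hk hlen
      have hkt : k.toNat + 3 ≤ row.length := by omega
      obtain ⟨a, b, c, rest, hd⟩ : ∃ a b c rest, row.drop k.toNat = a :: b :: c :: rest := by
        match h : row.drop k.toNat, (by rw [List.length_drop]; omega : 3 ≤ (row.drop k.toNat).length) with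
        | a :: b :: c :: rest, _ => exact ⟨a, b, c, rest, rfl⟩
      have g0 : row[k.toNat]? = some a := by
        have h := (List.getElem?_drop (xs := row) (i := k.toNat) (j := 0)).symm
        simpa [hd] using h
      have g1 : row[k.toNat + 1]? = some b := by
        have h := (List.getElem?_drop (xs := row) (i := k.toNat) (j := 1)).symm
        simpa [hd] using h
      have g2 : row[k.toNat + 2]? = some c := by
        have h := (List.getElem?_drop (xs := row) (i := k.toNat) (j := 2)).symm
        simpa [hd] using h
      have p0 : PySem.List.pyGet? row k = some a := by
        rw [PySem.List.pyGet?_of_nonneg row hk]; exact g0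
      have p1 : PySem.List.pyGet? row (k + 1) = some b := by
        rw [PySem.List.pyGet?_of_nonneg row (by omega)]
        rw [show (k+1).toNat = k.toNat + 1 by omega]; exact g1
      have p2 : PySem.List.pyGet? row (k + 1 + 1) = some c := by
        rw [PySem.List.pyGet?_of_nonneg row (by omega)]
        rw [show (k+1+1).toNat = k.toNat + 2 by omega]; exact g2
      rw [PySem.List.pyRange_one_cons (by omega)]
      simp only [List.foldl_cons]
      rw [show k + ((e + 1 : Nat) : Int) = (k + 1) + (e : Int) by push_cast; ring]
      have hdrop1 : row.drop (k + 1).toNat = b :: c :: rest := by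
        have h1 : row.drop (k + 1).toNat = (row.drop k.toNat).drop 1 := by
          rw [List.drop_drop]; congr 1; omega
        rw [h1, hd]
        simp
      rw [show (k + 2 : Int) = k + 1 + 1 by ring] -- align pyGet? row (k+2)
      rw [p0, p1, p2]
      dsimp only
      have step : (if a = b ∧ b = c then ch ++ [2] else ch)
          = ch ++ (if a = b ∧ b = c then [2] else []) := by
        by_cases h : a = b ∧ b = c <;> simp [h]
      rw [step, ih row (k+1) _ (by omega) (by omega), hdrop1]
      have htake : (row.drop k.toNat).take (e + 1 + 2) = a :: b :: c :: rest.take e := by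
        rw [hd]; rfl
      rw [htake]
      have : cntT (a :: b :: c :: rest.take e)
          = (if a = b ∧ b = c then 1 else 0) + cntT (b :: c :: rest.take e) := rfl
      rw [this]
      have htake2 : (b :: c :: rest).take (e + 2) = b :: c :: rest.take e := rfl
      rw [htake2]
      by_cases h : a = b ∧ b = c <;> simp [h, List.replicate_add]

lemma step_eq (N : Nat) (row acc : List Int) (h : N ≤ 2 ∨ N ≤ row.length) :
    (let ch :=
      (PySem.List.pyRange 0 ((N : Int) - 2) 1).foldl (fun ch i =>
        match PySem.List.pyGet? row i, PySem.List.pyGet? row (i + 1), PySem.List.pyGet? row (i + 2) with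
        | some a, some b, some c => if a = b ∧ b = c then ch ++ [2] else ch
        | _, _, _ => ch) acc
     if row.sum ≠ PySem.Int.floordiv (N : Int) 2 then ch ++ [3] else ch)
    = (let st := (pvRle (PySem.List.slice row none (some (N : Int)))).foldl
        (fun out vl => out ++ List.replicate (vl.2 - 2).toNat 2) acc
       if row.sum ≠ PySem.Int.floordiv (N : Int) 2 then st ++ [3] else st) := by
  have hslice : PySem.List.slice row none (some (N : Int)) = row.take N :=
    PySem.List.slice_to_natCast row N
  have hB : (pvRle (PySem.List.slice row none (some (N : Int)))).foldl
      (fun out vl => out ++ List.replicate (vl.2 - 2).toNat 2) acc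
      = acc ++ List.replicate (cntT (row.take N)) 2 := by
    rw [foldl_replicate, sum_pvRle, hslice]
  by_cases hN : N ≤ 2
  · have hA : PySem.List.pyRange 0 ((N : Int) - 2) 1 = [] :=
      PySem.List.pyRange_one_eq_nil (by omega)
    have hc : cntT (row.take N) = 0 := by
      match h2 : row.take N, List.length_take_le N row with
      | [], _ => simp [cntT]
      | [a], _ => simp [cntT]
      | [a, b], _ => simp [cntT]
      | a :: b :: c :: t, hl => simp at hl; omega
    rw [hc] at hB
    simp only [List.replicate_zero, List.append_nil] at hB
    dsimp only
    rw [hA, List.foldl_nil, hB]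
  · have hrow : N ≤ row.length := by omega
    have hA := foldA_inner (N - 2) row 0 acc (by omega) (by omega)
    rw [show (0 : Int) + ((N - 2 : Nat) : Int) = (N : Int) - 2 by omega] at hA
    simp only [Int.toNat_zero, List.drop_zero] at hA
    have hT : N - 2 + 2 = N := by omega
    rw [hT] at hA
    dsimp only
    rw [hA, hB]

theorem port_equal (matrix : List (List Int)) (hpre : Pre_check_rows_ga matrix) :
    check_rows_ga matrix = check_rows_ga_alt matrix := by
  unfold check_rows_ga check_rows_ga_alt
  dsimp only
  apply PySem.List.foldl_congr_mem
  intro acc row hmem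
  have h : matrix.length ≤ 2 ∨ matrix.length ≤ row.length := by
    rcases hpre with h | h
    · exact Or.inl h
    · exact Or.inr (h row hmem)
  exact step_eq matrix.length row acc h

-- ===== VERDICT (by name: the statement is the Claim_ definition above) =====
theorem check_rows_ga_spec : Claim_equal_check_rows_ga := by
  intro matrix _ hpre
  unfold Spec_check_rows_ga
  exact port_equal matrix hpre
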